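-- pv_equiv track=rewrite | github.com/BinaryBit99/multiobjective | fornow.py | dominates_objectives
-- ===== SOURCE A (Python) =====
-- def dominates_objectives(obj1, obj2):
--     """Check if obj1 dominates obj2 (minimization problem)."""
--     better_in_at_least_one = False
--     for i in range(len(obj1)):
--         if obj1[i] > obj2[i]:  # obj1 is worse in this objective
--             return False
--         elif obj1[i] < obj2[i]:  # obj1 is better in this objective
--             better_in_at_least_one = True
--     return better_in_at_least_one
-- ===== SOURCE B (Python) =====
-- def dominates_objectives(obj1, obj2):
--     """Check if obj1 dominates obj2 (minimization problem)."""
--     n = len(obj1)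
--     return all(obj1[i] <= obj2[i] for i in range(n)) and any(obj1[i] < obj2[i] for i in range(n))
-- ===== Notes on version B (the rewrite author's own statement) =====
-- stated objective: idiomatic
-- what changed: Replaces the manual flag-carrying loop with two independent short-circuiting quantifier passes (all <= and any <), dropping the explicit better_in_at_least_one accumulator.
import Mathlib
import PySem

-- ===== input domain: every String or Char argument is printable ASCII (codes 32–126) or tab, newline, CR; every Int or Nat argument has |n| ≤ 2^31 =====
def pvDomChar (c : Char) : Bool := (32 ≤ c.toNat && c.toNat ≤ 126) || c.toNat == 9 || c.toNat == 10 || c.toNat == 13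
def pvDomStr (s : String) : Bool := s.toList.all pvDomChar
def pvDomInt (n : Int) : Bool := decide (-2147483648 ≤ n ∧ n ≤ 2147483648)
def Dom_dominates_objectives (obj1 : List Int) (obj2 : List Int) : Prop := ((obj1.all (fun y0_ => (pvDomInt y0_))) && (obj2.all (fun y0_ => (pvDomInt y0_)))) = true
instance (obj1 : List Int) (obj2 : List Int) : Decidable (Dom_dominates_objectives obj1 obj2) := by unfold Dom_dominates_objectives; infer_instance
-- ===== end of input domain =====

-- B replaces A's manual flag-carrying loop with two independent short-circuiting
-- quantifier passes (all <=, any <) over the index range: idiomatic, same cost.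


-- ===== PORT A =====
-- the 'for i in range(len(obj1))' loop with the early 'return False' and the flag;
-- obj2[i] may be out of range (IndexError) → pyGet? none, excluded by Pre_ (port returns false there)
def domA_go (obj1 : List Int) (obj2 : List Int) (i : Nat) (better : Bool) : Bool :=
  if h : i < obj1.length then
    match PySem.List.pyGet? obj2 (i : Int) with
    | none => false
    | some b =>
      if obj1[i] > b then false
      else domA_go obj1 obj2 (i + 1) (better || decide (obj1[i] < b))
  else better
termination_by obj1.length - i

def dominates_objectives (obj1 : List Int) (obj2 : List Int) : Bool :=
  domA_go obj1 obj2 0 false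

-- ===== PORT B =====
-- all(obj1[i] <= obj2[i] for i in range(n)): short-circuiting pass
def allLe (obj1 : List Int) (obj2 : List Int) (i : Nat) : Bool :=
  if h : i < obj1.length then
    match PySem.List.pyGet? obj2 (i : Int) with
    | none => false
    | some b => if obj1[i] ≤ b then allLe obj1 obj2 (i + 1) else false
  else true
termination_by obj1.length - i

-- any(obj1[i] < obj2[i] for i in range(n)): short-circuiting pass
def anyLt (obj1 : List Int) (obj2 : List Int) (i : Nat) : Bool :=
  if h : i < obj1.length then
    match PySem.List.pyGet? obj2 (i : Int) with
    | none => false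
    | some b => if obj1[i] < b then true else anyLt obj1 obj2 (i + 1)
  else false
termination_by obj1.length - i

def dominates_objectives_alt (obj1 : List Int) (obj2 : List Int) : Bool :=
  allLe obj1 obj2 0 && anyLt obj1 obj2 0

-- ===== PRECONDITION & SPEC =====
-- Pre_ excludes exactly the inputs on which Python A (and B alike) raises IndexError:
-- obj2 shorter than obj1 with no violation obj1[k] > obj2[k] on the common prefix.
def Pre_dominates_objectives (obj1 : List Int) (obj2 : List Int) : Prop :=
  obj1.length ≤ obj2.length ∨
    ∃ k, k < obj1.length ∧ k < obj2.length ∧ obj2[k]! < obj1[k]! ∧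
      ∀ j, j < k → obj1[j]! ≤ obj2[j]!
instance (obj1 : List Int) (obj2 : List Int) : Decidable (Pre_dominates_objectives obj1 obj2) := by
  unfold Pre_dominates_objectives; infer_instance
def pvWitness_dominates_objectives : List Int × List Int := ([1, 2], [1, 3])
def Spec_dominates_objectives (obj1 : List Int) (obj2 : List Int) (out : Bool) : Prop := out = dominates_objectives_alt obj1 obj2
instance (obj1 : List Int) (obj2 : List Int) (out : Bool) : Decidable (Spec_dominates_objectives obj1 obj2 out) := by unfold Spec_dominates_objectives; infer_instance

-- ===== CLAIM (what is proved, stated in full; the proofs are below) =====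
def Claim_equal_dominates_objectives : Prop := ∀ (obj1 : List Int) (obj2 : List Int), Dom_dominates_objectives obj1 obj2 → Pre_dominates_objectives obj1 obj2 → Spec_dominates_objectives obj1 obj2 (dominates_objectives obj1 obj2)

-- ===== LEMMAS AND PROOFS =====

lemma pyGet_at (obj2 : List Int) (i : Nat) (h : i < obj2.length) :
    PySem.List.pyGet? obj2 (i : Int) = some obj2[i] := by
  simp [List.getElem?_eq_getElem h]

lemma getBang_eq (l : List Int) (i : Nat) (h : i < l.length) : l[i]! = l[i] := by
  simp [List.getElem!_eq_getElem?_getD, List.getElem?_eq_getElem h]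

-- when obj2 is long enough, A's loop from i equals allLe i && (better || anyLt i)
lemma domA_go_eq_of_le (obj1 obj2 : List Int) (hle : obj1.length ≤ obj2.length) :
    ∀ d i better, i + d = obj1.length →
      domA_go obj1 obj2 i better = (allLe obj1 obj2 i && (better || anyLt obj1 obj2 i)) := by
  intro d
  induction d with
  | zero =>
    intro i better hd
    rw [domA_go, allLe, anyLt]
    simp [show ¬ i < obj1.length by omega]
  | succ d IH =>
    intro i better hd
    have h : i < obj1.length := by omega
    have h2 : i < obj2.length := lt_of_lt_of_le h hle
    rw [domA_go, allLe, anyLt]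
    simp only [dif_pos h, pyGet_at obj2 i h2]
    by_cases hgt : obj2[i] < obj1[i]
    · simp [hgt, not_le.mpr hgt]
    · have hle' : obj1[i] ≤ obj2[i] := not_lt.mp hgt
      rw [IH (i + 1) (better || decide (obj1[i] < obj2[i])) (by omega)]
      simp only [hgt, hle']
      cases hlt : decide (obj1[i] < obj2[i]) <;>
        cases better <;> simp [hlt]

-- when the first violation obj1[k] > obj2[k] sits at k (both in range), both sides are false from any i with i + d = k
lemma domA_go_viol (obj1 obj2 : List Int) (k : Nat) (h1 : k < obj1.length)
    (h2 : k < obj2.length) (hv : obj2[k]! < obj1[k]!) :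
    ∀ d i better, i + d = k → (∀ j, i ≤ j → j < k → obj1[j]! ≤ obj2[j]!) →
      domA_go obj1 obj2 i better = false ∧ allLe obj1 obj2 i = false := by
  have hv' : obj2[k] < obj1[k] := by rwa [getBang_eq _ _ h1, getBang_eq _ _ h2] at hv
  intro d
  induction d with
  | zero =>
    intro i better hik _
    have : i = k := by omega
    subst this
    rw [domA_go, allLe]
    simp only [dif_pos h1, pyGet_at obj2 i h2]
    simp [hv', not_le.mpr hv']
  | succ d IH =>
    intro i better hik hpre
    have hi1 : i < obj1.length := by omega
    have hi2 : i < obj2.length := by omega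
    have hle : obj1[i] ≤ obj2[i] := by
      have := hpre i le_rfl (by omega)
      rwa [getBang_eq _ _ hi1, getBang_eq _ _ hi2] at this
    have IH' := IH (i + 1) (better || decide (obj1[i] < obj2[i])) (by omega)
      (fun j hj1 hj2 => hpre j (by omega) hj2)
    rw [domA_go, allLe]
    simp only [dif_pos hi1, pyGet_at obj2 i hi2]
    simp [not_lt.mpr hle, hle, IH'.1, IH'.2]

-- ===== VERDICT (by name: the statement is the Claim_ definition above) =====
theorem dominates_objectives_spec : Claim_equal_dominates_objectives := by
  intro obj1 obj2 _ hpre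
  unfold Spec_dominates_objectives dominates_objectives dominates_objectives_alt
  rcases hpre with hle | ⟨k, h1, h2, hv, hpre⟩
  · rw [domA_go_eq_of_le obj1 obj2 hle obj1.length 0 false (by omega)]
    simp
  · obtain ⟨hA, hAll⟩ := domA_go_viol obj1 obj2 k h1 h2 hv k 0 false (by omega)
      (fun j _ hj => hpre j hj)
    simp [hA, hAll]
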